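-- pv_equiv track=rewrite | github.com/martin-bachmann/project-data-structures-two | src/track_orders.py | contador_mais_comum
-- ===== SOURCE A (Python) =====
-- def contador_mais_comum(data):
--     mais_comum = ""
--     mais_comum_contador = 0
--
--     for item in data.items():
--         if item[1] > mais_comum_contador:
--             mais_comum = item[0]
--             mais_comum_contador = item[1]
--
--     return mais_comum
-- ===== SOURCE B (Python) =====
-- def contador_mais_comum(data):
--     # staged passes: (1) maximum count, (2) threshold, (3) first key attaining it
--     m = max(data.values(), default=0)
--     if m <= 0:
--         return ""
--     return next(k for k, v in data.items() if v == m)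
-- ===== Notes on version B (the rewrite author's own statement) =====
-- stated objective: alternative
-- what changed: Replaces A's single guarded running-max scan carrying a (key,count) accumulator by staged passes: first compute the maximum count with max(values, default=0), apply the strict >0 threshold, then a separate search returns the first key whose count equals that maximum.
import Mathlib
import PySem

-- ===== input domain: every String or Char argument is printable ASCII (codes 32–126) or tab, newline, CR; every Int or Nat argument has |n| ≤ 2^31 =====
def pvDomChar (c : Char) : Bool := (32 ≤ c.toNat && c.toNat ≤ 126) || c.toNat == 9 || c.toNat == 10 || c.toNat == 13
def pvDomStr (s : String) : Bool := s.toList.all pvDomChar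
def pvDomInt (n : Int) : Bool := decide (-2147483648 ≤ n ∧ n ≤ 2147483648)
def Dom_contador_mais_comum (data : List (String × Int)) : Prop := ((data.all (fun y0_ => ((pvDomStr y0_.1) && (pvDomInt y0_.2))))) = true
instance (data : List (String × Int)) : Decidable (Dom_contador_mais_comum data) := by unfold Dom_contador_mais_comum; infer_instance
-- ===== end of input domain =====

-- B replaces A's single guarded running-max scan by staged passes: max of the counts, a >0 threshold, then a separate first-key search (alternative decomposition; same cost).

-- ===== PORT A =====
def contador_mais_comum (data : List (String × Int)) : String :=
  ((PySem.Dict.ofList data).items.foldl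
    (fun st item => if item.2 > st.2 then (item.1, item.2) else st) ("", 0)).1

-- ===== PORT B =====
-- max(data.values(), default=0) is PySem.List.max? on the values with the 0 default;
-- the `next(...)` search is `find?`; its StopIteration branch is unreachable (m > 0 is attained) and ports to "".
def contador_mais_comum_alt (data : List (String × Int)) : String :=
  let d := PySem.Dict.ofList data
  let m : Int := match PySem.List.max? d.values (fun y => y) with
                 | none => 0
                 | some v => v
  if m ≤ 0 then ""
  else
    match d.items.find? (fun kv => kv.2 == m) with
    | some kv => kv.1
    | none => ""

-- ===== PRECONDITION & SPEC =====
def Spec_contador_mais_comum (data : List (String × Int)) (out : String) : Prop := out = contador_mais_comum_alt data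
instance (data : List (String × Int)) (out : String) : Decidable (Spec_contador_mais_comum data out) := by unfold Spec_contador_mais_comum; infer_instance

-- ===== CLAIM (what is proved, stated in full; the proofs are below) =====
def Claim_equal_contador_mais_comum : Prop := ∀ (data : List (String × Int)), Dom_contador_mais_comum data → Spec_contador_mais_comum data (contador_mais_comum data)

-- ===== LEMMAS AND PROOFS =====

-- A's loop body and loop, over an arbitrary accumulator (proof-only helpers)
def pvStep (st item : String × Int) : String × Int := if item.2 > st.2 then (item.1, item.2) else st
def pvFold (l : List (String × Int)) (a : String × Int) : String × Int := l.foldl pvStep a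

-- the running max of the values, seeded with b
def pvMaxV (l : List (String × Int)) (b : Int) : Int := l.foldl (fun m kv => max m kv.2) b

theorem pvMaxV_le (l : List (String × Int)) (b : Int) :
    b ≤ pvMaxV l b ∧ ∀ kv ∈ l, kv.2 ≤ pvMaxV l b := by
  have h := PySem.List.le_foldl_max_int l (fun kv => kv.2) b
  exact h

theorem pvFold_all_le (l : List (String × Int)) (a : String × Int)
    (h : ∀ kv ∈ l, kv.2 ≤ a.2) : pvFold l a = a := by
  induction l with
  | nil => rfl
  | cons x t ih =>
    have hx : x.2 ≤ a.2 := h x (List.mem_cons_self ..)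
    show pvFold t (pvStep a x) = a
    rw [show pvStep a x = a from if_neg (by omega)]
    exact ih (fun kv hkv => h kv (List.mem_cons_of_mem _ hkv))

-- the heart: when something in l exceeds the accumulator's count, A's fold lands on
-- the FIRST element whose count equals the running maximum, and its count IS that maximum
theorem pvFold_find (l : List (String × Int)) : ∀ (a : String × Int),
    a.2 < pvMaxV l a.2 →
    l.find? (fun kv => kv.2 == pvMaxV l a.2) = some (pvFold l a) ∧
    (pvFold l a).2 = pvMaxV l a.2 := by
  induction l with
  | nil => intro a h; simp [pvMaxV] at h
  | cons x t ih =>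
    intro a h
    have hM : pvMaxV (x :: t) a.2 = pvMaxV t (max a.2 x.2) := rfl
    by_cases hx : a.2 < x.2
    · -- x becomes the accumulator
      have hstep : pvStep a x = x := if_pos hx
      have hfold : pvFold (x :: t) a = pvFold t x := by
        show pvFold t (pvStep a x) = pvFold t x; rw [hstep]
      have hmax : max a.2 x.2 = x.2 := by omega
      by_cases ht : x.2 < pvMaxV t x.2
      · -- the max is further down
        obtain ⟨h1, h2⟩ := ih x ht
        have hne : (x.2 == pvMaxV (x :: t) a.2) = false := by
          rw [hM, hmax]; simp; omega
        refine ⟨?_, ?_⟩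
        · rw [List.find?_cons, hne, hfold, hM, hmax]; exact h1
        · rw [hfold, hM, hmax]; exact h2
      · -- x itself is the max
        have hall : ∀ kv ∈ t, kv.2 ≤ x.2 := by
          intro kv hkv
          have := (pvMaxV_le t x.2).2 kv hkv
          omega
        have hfx : pvFold t x = x := pvFold_all_le t x hall
        have hMx : pvMaxV t x.2 = x.2 := by
          have := (pvMaxV_le t x.2).1; omega
        refine ⟨?_, ?_⟩
        · rw [List.find?_cons, hM, hmax, hMx]
          simp [hfold, hfx]
        · rw [hfold, hfx, hM, hmax, hMx]
    · -- x is skipped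
      have hstep : pvStep a x = a := if_neg hx
      have hfold : pvFold (x :: t) a = pvFold t a := by
        show pvFold t (pvStep a x) = pvFold t a; rw [hstep]
      have hmax : max a.2 x.2 = a.2 := by omega
      have h' : a.2 < pvMaxV t a.2 := by rw [hM, hmax] at h; exact h
      obtain ⟨h1, h2⟩ := ih a h'
      have hne : (x.2 == pvMaxV (x :: t) a.2) = false := by
        rw [hM, hmax]; simp; omega
      refine ⟨?_, ?_⟩
      · rw [List.find?_cons, hne, hfold, hM, hmax]; exact h1
      · rw [hfold, hM, hmax]; exact h2

-- B's maximum (with default 0) is the 0-seeded running max when it is positive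
theorem values_max_eq (items : List (String × Int)) :
    (match PySem.List.max? (items.map (·.2)) (fun y => y) with
      | none => (0 : Int) | some v => v) =
    (match items with
      | [] => (0 : Int)
      | x :: t => pvMaxV t x.2) := by
  cases items with
  | nil => rfl
  | cons x t =>
    simp only [List.map_cons, PySem.List.max?_id_cons]
    show (t.map (·.2)).foldl max x.2 = pvMaxV t x.2
    rw [List.foldl_map]; rfl

-- pvMaxV peels a `max` off its seed
theorem pvMaxV_max (t : List (String × Int)) : ∀ (b c : Int), pvMaxV t (max b c) = max b (pvMaxV t c) := by
  induction t with
  | nil => intro b c; rfl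
  | cons y s ih =>
    intro b c
    show pvMaxV s (max (max b c) y.2) = max b (pvMaxV s (max c y.2))
    rw [max_assoc, ih]

-- ===== VERDICT (by name: the statement is the Claim_ definition above) =====
theorem contador_mais_comum_spec : Claim_equal_contador_mais_comum := by
  intro data _
  show contador_mais_comum data = contador_mais_comum_alt data
  unfold contador_mais_comum contador_mais_comum_alt
  dsimp only
  have hvals : (PySem.Dict.ofList data).values = (PySem.Dict.ofList data).items.map (·.2) := rfl
  rw [hvals, values_max_eq]
  rcases hl : (PySem.Dict.ofList data).items with _ | ⟨x, t⟩
  · rfl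
  · simp only []
    have hA : ((x :: t).foldl (fun st item => if item.2 > st.2 then (item.1, item.2) else st) ("", 0)) = pvFold (x :: t) ("", 0) := rfl
    have hM0 : pvMaxV (x :: t) ((""), (0:Int)).2 = max 0 (pvMaxV t x.2) := by
      show pvMaxV t (max 0 x.2) = max 0 (pvMaxV t x.2)
      exact pvMaxV_max t 0 x.2
    by_cases hm : pvMaxV t x.2 ≤ 0
    · -- all counts ≤ 0: A's guard never fires, B takes the "" branch
      rw [if_pos hm]
      have hxle : x.2 ≤ 0 := le_trans (pvMaxV_le t x.2).1 hm
      have hall : ∀ kv ∈ x :: t, kv.2 ≤ ((""), (0:Int)).2 := by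
        intro kv hkv
        rcases List.mem_cons.mp hkv with h | h
        · subst h; exact hxle
        · exact le_trans ((pvMaxV_le t x.2).2 kv h) hm
      rw [hA, pvFold_all_le _ _ hall]
    · rw [if_neg hm]
      have h0 : ((""), (0:Int)).2 < pvMaxV (x :: t) ((""), (0:Int)).2 := by
        rw [hM0]; show (0:Int) < _; omega
      obtain ⟨h1, _⟩ := pvFold_find (x :: t) ("", 0) h0
      have hMeq : pvMaxV (x :: t) ((""), (0:Int)).2 = pvMaxV t x.2 := by
        rw [hM0]; omega
      rw [hMeq] at h1
      rw [hA, h1]
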